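-- pv_equiv track=rewrite | github.com/NoSFeR88/habito-pro-flutter | scripts/analyze-pr.py | get_workflow_template_recommendation
-- ===== SOURCE A (Python) =====
-- from typing import Dict, List, Tuple
--
-- def get_workflow_template_recommendation(changed_files: List[str]) -> str:
--     """Recommend workflow template based on changed files."""
--     if any('test' in f.lower() for f in changed_files):
--         return 'add-tests'
--     elif any(f.endswith('.arb') for f in changed_files):
--         return 'add-translation'
--     elif any('pubspec.yaml' in f for f in changed_files):
--         return 'update-dependencies'
--     elif any('refactor' in f.lower() for f in changed_files):
--         return 'refactor'
--     elif any('fix' in f.lower() or 'bug' in f.lower() for f in changed_files):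
--         return 'fix-bug'
--     else:
--         return 'add-feature'
-- ===== SOURCE B (Python) =====
-- def get_workflow_template_recommendation(changed_files):
--     """Recommend workflow template based on changed files (single pass setting flags)."""
--     has_test = has_arb = has_pubspec = has_refactor = has_fixbug = False
--     for f in changed_files:
--         low = f.lower()
--         if 'test' in low:
--             has_test = True
--         if f.endswith('.arb'):
--             has_arb = True
--         if 'pubspec.yaml' in f:
--             has_pubspec = True
--         if 'refactor' in low:
--             has_refactor = True
--         if 'fix' in low or 'bug' in low:
--             has_fixbug = True
--     if has_test:
--         return 'add-tests'
--     if has_arb: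
--         return 'add-translation'
--     if has_pubspec:
--         return 'update-dependencies'
--     if has_refactor:
--         return 'refactor'
--     if has_fixbug:
--         return 'fix-bug'
--     return 'add-feature'
-- ===== Notes on version B (the rewrite author's own statement) =====
-- stated objective: alternative
-- what changed: Replaces A's five separate any()-scans over the list with one pass that sets five boolean flags per file and then picks the template by the same priority order.
import Mathlib
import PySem

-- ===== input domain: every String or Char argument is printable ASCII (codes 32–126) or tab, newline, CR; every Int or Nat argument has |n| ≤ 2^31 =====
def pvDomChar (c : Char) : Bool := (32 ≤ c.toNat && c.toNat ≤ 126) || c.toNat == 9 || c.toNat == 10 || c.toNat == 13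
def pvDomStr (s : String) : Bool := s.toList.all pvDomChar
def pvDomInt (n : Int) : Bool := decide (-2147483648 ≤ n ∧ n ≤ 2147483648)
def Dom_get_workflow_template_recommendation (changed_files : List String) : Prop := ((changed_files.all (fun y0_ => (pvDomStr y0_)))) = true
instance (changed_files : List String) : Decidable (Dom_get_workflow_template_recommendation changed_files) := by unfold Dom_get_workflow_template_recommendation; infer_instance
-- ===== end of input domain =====

-- B replaces A's five separate any()-scans with ONE pass that sets five boolean flags, then the same priority chain (objective: alternative decomposition).

-- ===== PORT A =====
def get_workflow_template_recommendation (changed_files : List String) : String :=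
  if changed_files.any (fun f => PySem.Str.isIn "test" (PySem.Str.lower f)) then "add-tests"
  else if changed_files.any (fun f => PySem.Str.endswith f ".arb") then "add-translation"
  else if changed_files.any (fun f => PySem.Str.isIn "pubspec.yaml" f) then "update-dependencies"
  else if changed_files.any (fun f => PySem.Str.isIn "refactor" (PySem.Str.lower f)) then "refactor"
  else if changed_files.any (fun f => PySem.Str.isIn "fix" (PySem.Str.lower f) || PySem.Str.isIn "bug" (PySem.Str.lower f)) then "fix-bug"
  else "add-feature"

-- ===== PORT B =====
-- one pass over the files, updating the five flags exactly as Source B's loop body does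
def pvFlagsStep (t : Bool × Bool × Bool × Bool × Bool) (f : String) : Bool × Bool × Bool × Bool × Bool :=
  let low := PySem.Str.lower f
  ( if PySem.Str.isIn "test" low then true else t.1,
    if PySem.Str.endswith f ".arb" then true else t.2.1,
    if PySem.Str.isIn "pubspec.yaml" f then true else t.2.2.1,
    if PySem.Str.isIn "refactor" low then true else t.2.2.2.1,
    if PySem.Str.isIn "fix" low || PySem.Str.isIn "bug" low then true else t.2.2.2.2 )

def get_workflow_template_recommendation_alt (changed_files : List String) : String :=
  let flags := changed_files.foldl pvFlagsStep (false, false, false, false, false)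
  if flags.1 then "add-tests"
  else if flags.2.1 then "add-translation"
  else if flags.2.2.1 then "update-dependencies"
  else if flags.2.2.2.1 then "refactor"
  else if flags.2.2.2.2 then "fix-bug"
  else "add-feature"

-- ===== PRECONDITION & SPEC =====
def Spec_get_workflow_template_recommendation (changed_files : List String) (out : String) : Prop := out = get_workflow_template_recommendation_alt changed_files
instance (changed_files : List String) (out : String) : Decidable (Spec_get_workflow_template_recommendation changed_files out) := by unfold Spec_get_workflow_template_recommendation; infer_instance

-- ===== CLAIM (what is proved, stated in full; the proofs are below) =====
def Claim_equal_get_workflow_template_recommendation : Prop := ∀ (changed_files : List String), Dom_get_workflow_template_recommendation changed_files → Spec_get_workflow_template_recommendation changed_files (get_workflow_template_recommendation changed_files)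

-- ===== LEMMAS AND PROOFS =====

-- the flag fold computes exactly the five any-scans (OR-ed onto the accumulator)
theorem pvFlags_fold (xs : List String) (t : Bool × Bool × Bool × Bool × Bool) :
    xs.foldl pvFlagsStep t =
      ( t.1 || xs.any (fun f => PySem.Str.isIn "test" (PySem.Str.lower f)),
        t.2.1 || xs.any (fun f => PySem.Str.endswith f ".arb"),
        t.2.2.1 || xs.any (fun f => PySem.Str.isIn "pubspec.yaml" f),
        t.2.2.2.1 || xs.any (fun f => PySem.Str.isIn "refactor" (PySem.Str.lower f)),
        t.2.2.2.2 || xs.any (fun f => PySem.Str.isIn "fix" (PySem.Str.lower f) || PySem.Str.isIn "bug" (PySem.Str.lower f)) ) := by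
  induction xs generalizing t with
  | nil => simp
  | cons x xs ih =>
    simp only [List.foldl_cons, List.any_cons, ih, pvFlagsStep]
    obtain ⟨a, b, c, d, e⟩ := t
    dsimp only
    split_ifs <;> simp_all

-- ===== VERDICT (by name: the statement is the Claim_ definition above) =====
theorem get_workflow_template_recommendation_spec : Claim_equal_get_workflow_template_recommendation := by
  intro changed_files _
  unfold Spec_get_workflow_template_recommendation get_workflow_template_recommendation get_workflow_template_recommendation_alt
  simp only [pvFlags_fold, Bool.false_or]
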